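-- pv_equiv track=rewrite | github.com/kdush/OpenClaw-MiroSearch | libs/miroflow-tools/src/miroflow_tools/dev_mcp_servers/search_and_scrape_webpage.py | _extract_header_charset
-- ===== SOURCE A (Python) =====
-- from typing import Any, Dict, List, Optional, Tuple
--
-- def _extract_header_charset(content_type: str) -> Optional[str]:
--     """从 Content-Type 头提取 charset，例如 'text/html; charset=GBK'。"""
--     if not content_type or "charset=" not in content_type.lower():
--         return None
--     for part in content_type.split(";"):
--         part = part.strip()
--         if part.lower().startswith("charset="):
--             value = part[len("charset="):].strip().strip('"\'').strip()
--             return value or None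
--     return None
-- ===== SOURCE B (Python) =====
-- from typing import Optional
--
-- def _extract_header_charset(content_type: str) -> Optional[str]:
--     """Parse every ';'-separated segment into a first-wins parameter dict
--     keyed by the lowercased text before the first '=', then look up
--     'charset' and clean its value."""
--     params = {}
--     for part in content_type.split(";"):
--         part = part.strip()
--         key, sep, val = part.partition("=")
--         if sep:
--             params.setdefault(key.lower(), val)
--     raw = params.get("charset")
--     if raw is None:
--         return None
--     value = raw.strip().strip("\"'").strip()
--     return value or None
-- ===== Notes on version B (the rewrite author's own statement) =====
-- stated objective: alternative
-- what changed: Replaces A's substring guard plus prefix-match early-return scan by a generic parameter parse: each semicolon-separated segment is split at its first equals sign and collected into a first-wins dict keyed by the lowercased key text, and the answer is a single dict lookup of the charset key followed by the value cleanup.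
import Mathlib
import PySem

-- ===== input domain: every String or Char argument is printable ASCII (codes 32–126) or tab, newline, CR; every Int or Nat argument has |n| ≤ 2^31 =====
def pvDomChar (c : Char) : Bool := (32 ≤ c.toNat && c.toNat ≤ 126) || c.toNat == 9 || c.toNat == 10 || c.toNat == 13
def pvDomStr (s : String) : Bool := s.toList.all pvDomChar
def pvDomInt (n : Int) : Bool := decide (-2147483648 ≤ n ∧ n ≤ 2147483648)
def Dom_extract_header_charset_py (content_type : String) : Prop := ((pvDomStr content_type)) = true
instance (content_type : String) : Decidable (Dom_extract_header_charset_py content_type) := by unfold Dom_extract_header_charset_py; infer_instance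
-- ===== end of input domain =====

set_option maxHeartbeats 1000000


-- B replaces A's containment guard + first-prefix-match scan by one pass that parses EVERY 'key=value'
-- segment into a first-wins parameter dict and then looks up "charset"; return value only.

-- ===== PORT A =====
-- A's loop 'for part in content_type.split(";"): part = part.strip(); if part.lower().startswith("charset="): return … '
def pvLoopA : List (List Char) → Option String
  | [] => none
  | p :: rest =>
    let part := PySem.Chars.strip p
    if PySem.Chars.startswith (PySem.Chars.lower part) ("charset=".toList) then
      let value := PySem.Chars.strip (PySem.Chars.stripChars
        (PySem.Chars.strip (PySem.Chars.slice part (some 8) none)) ("\"'".toList))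
      if value.isEmpty then none else some (String.ofList value)
    else pvLoopA rest

def extract_header_charset_py (content_type : String) : Option String :=
  if PySem.Str.len content_type == 0 ||
      !(PySem.Str.isIn "charset=" (PySem.Str.lower content_type)) then
    none
  else
    pvLoopA (PySem.Chars.splitOn content_type.toList (";".toList))

-- ===== PORT B =====
-- B's loop body: 'part = part.strip(); key, sep, val = part.partition("="); if sep: params.setdefault(key.lower(), val)'
-- partition("=") ported by hand: key = chars before the first '=', val = chars after it; 'sep' is nonempty iff '=' ∈ part (exact for a 1-char separator)
def pvStepB (d : PySem.Dict (List Char) (List Char)) (p : List Char) : PySem.Dict (List Char) (List Char) :=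
  let part := PySem.Chars.strip p
  let key := part.takeWhile (fun c => c != '=')
  if '=' ∈ part then d.setdefault (PySem.Chars.lower key) (part.drop (key.length + 1)) else d

def extract_header_charset_py_alt (content_type : String) : Option String :=
  let params := (PySem.Chars.splitOn content_type.toList (";".toList)).foldl pvStepB PySem.Dict.empty
  match params.get? ("charset".toList) with
  | none => none
  | some raw =>
    let value := PySem.Chars.strip (PySem.Chars.stripChars (PySem.Chars.strip raw) ("\"'".toList))
    if value.isEmpty then none else some (String.ofList value)

-- ===== PRECONDITION & SPEC =====
def Spec_extract_header_charset_py (content_type : String) (out : Option String) : Prop := out = extract_header_charset_py_alt content_type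
instance (content_type : String) (out : Option String) : Decidable (Spec_extract_header_charset_py content_type out) := by unfold Spec_extract_header_charset_py; infer_instance

-- ===== CLAIM (what is proved, stated in full; the proofs are below) =====
def Claim_equal_extract_header_charset_py : Prop := ∀ (content_type : String), Dom_extract_header_charset_py content_type → Spec_extract_header_charset_py content_type (extract_header_charset_py content_type)

-- ===== LEMMAS AND PROOFS =====

-- the first raw (uncleaned) charset value A's scan would find
def pvFindRaw : List (List Char) → Option (List Char)
  | [] => none
  | p :: rest =>
    let part := PySem.Chars.strip p
    if PySem.Chars.startswith (PySem.Chars.lower part) ("charset=".toList) then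
      some (PySem.Chars.slice part (some 8) none)
    else pvFindRaw rest

-- the common value cleanup '.strip().strip('"\'').strip()' + 'or None'
def pvClean (raw : List Char) : Option String :=
  let value := PySem.Chars.strip (PySem.Chars.stripChars (PySem.Chars.strip raw) ("\"'".toList))
  if value.isEmpty then none else some (String.ofList value)

theorem pvLoopA_cons (p : List Char) (t : List (List Char)) :
    pvLoopA (p :: t) =
      (if PySem.Chars.startswith (PySem.Chars.lower (PySem.Chars.strip p)) ("charset=".toList) then
        pvClean (PySem.Chars.slice (PySem.Chars.strip p) (some 8) none)
      else pvLoopA t) := rfl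

theorem pvFindRaw_cons (p : List Char) (t : List (List Char)) :
    pvFindRaw (p :: t) =
      (if PySem.Chars.startswith (PySem.Chars.lower (PySem.Chars.strip p)) ("charset=".toList) then
        some (PySem.Chars.slice (PySem.Chars.strip p) (some 8) none)
      else pvFindRaw t) := rfl

theorem pv_bind_some_clean (v : List Char) : (some v).bind pvClean = pvClean v := rfl

theorem pv_loopA_eq_findRaw (l : List (List Char)) : pvLoopA l = (pvFindRaw l).bind pvClean := by
  induction l with
  | nil => rfl
  | cons p t ih =>
    rw [pvLoopA_cons, pvFindRaw_cons]
    by_cases hc : PySem.Chars.startswith (PySem.Chars.lower (PySem.Chars.strip p)) ("charset=".toList) = true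
    · rw [if_pos hc, if_pos hc, pv_bind_some_clean]
    · rw [if_neg hc, if_neg hc]
      exact ih

theorem pv_lowerChar_eq (c : Char) (h : PySem.Chars.lowerChar c = '=') : c = '=' := by
  unfold PySem.Chars.lowerChar PySem.Chars.isupper at h
  split at h
  · rename_i hc
    simp only [Bool.and_eq_true, decide_eq_true_eq, Char.le_def] at hc
    exfalso
    have h61 : (Char.ofNat (c.toNat + 32)).toNat = 61 := by rw [h]; rfl
    have h1 : 65 ≤ c.toNat := hc.1
    have h2 : c.toNat ≤ 90 := hc.2
    have hv : (Char.ofNat (c.toNat + 32)).toNat = c.toNat + 32 := by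
      rw [Char.ofNat, dif_pos (by omega)]; rfl
    omega
  · exact h

theorem pv_lower_eq_map (l : List Char) : PySem.Chars.lower l = l.map PySem.Chars.lowerChar := rfl

theorem pv_dropWhile_head_eq (l : List Char) (y : Char) (ys : List Char)
    (h : l.dropWhile (fun c => c != '=') = y :: ys) : y = '=' := by
  have hne : l.dropWhile (fun c => c != '=') ≠ [] := by simp [h]
  have hh := List.head_dropWhile_not (p := fun c => c != '=') (l := l) hne
  have hyh : (l.dropWhile (fun c => c != '=')).head hne = y := by simp [h]
  rw [hyh] at hh
  simpa using hh

-- A's match test on a stripped segment ↔ B's partition test: '=' occurs and the text before it lowers to "charset"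
theorem pv_match_iff (part : List Char) :
    PySem.Chars.startswith (PySem.Chars.lower part) ("charset=".toList) = true ↔
      ('=' ∈ part ∧ PySem.Chars.lower (part.takeWhile (fun c => c != '=')) = "charset".toList) := by
  have hpat : "charset=".toList = ['c','h','a','r','s','e','t','='] := rfl
  have hpat7 : "charset".toList = ['c','h','a','r','s','e','t'] := rfl
  rw [hpat, hpat7, pv_lower_eq_map, pv_lower_eq_map]
  constructor
  · intro h
    obtain ⟨t, ht⟩ := (PySem.Chars.startswith_iff _ _).mp h
    rcases part with _|⟨c0,part⟩ <;> try (exfalso; simp at ht; done)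
    rcases part with _|⟨c1,part⟩ <;> try (exfalso; simp at ht; done)
    rcases part with _|⟨c2,part⟩ <;> try (exfalso; simp at ht; done)
    rcases part with _|⟨c3,part⟩ <;> try (exfalso; simp at ht; done)
    rcases part with _|⟨c4,part⟩ <;> try (exfalso; simp at ht; done)
    rcases part with _|⟨c5,part⟩ <;> try (exfalso; simp at ht; done)
    rcases part with _|⟨c6,part⟩ <;> try (exfalso; simp at ht; done)
    rcases part with _|⟨c7,part⟩ <;> try (exfalso; simp at ht; done)
    simp only [List.map_cons, List.cons_append, List.cons.injEq] at ht
    obtain ⟨h0, h1, h2, h3, h4, h5, h6, h7, -⟩ := ht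
    have hc7 : c7 = '=' := pv_lowerChar_eq _ h7.symm
    have n0 : c0 ≠ '=' := fun he => by rw [he] at h0; exact absurd h0 (by decide)
    have n1 : c1 ≠ '=' := fun he => by rw [he] at h1; exact absurd h1 (by decide)
    have n2 : c2 ≠ '=' := fun he => by rw [he] at h2; exact absurd h2 (by decide)
    have n3 : c3 ≠ '=' := fun he => by rw [he] at h3; exact absurd h3 (by decide)
    have n4 : c4 ≠ '=' := fun he => by rw [he] at h4; exact absurd h4 (by decide)
    have n5 : c5 ≠ '=' := fun he => by rw [he] at h5; exact absurd h5 (by decide)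
    have n6 : c6 ≠ '=' := fun he => by rw [he] at h6; exact absurd h6 (by decide)
    subst hc7
    refine ⟨by simp, ?_⟩
    simp [n0, n1, n2, n3, n4, n5, n6, ← h0, ← h1, ← h2, ← h3, ← h4, ← h5, ← h6]
  · rintro ⟨hmem, hk⟩
    have hsplit := List.takeWhile_append_dropWhile (p := fun c => c != '=') (l := part)
    have hknoeq : '=' ∉ part.takeWhile (fun c => c != '=') := by
      intro hin
      have := List.mem_takeWhile_imp hin
      simp at this
    have hmem' : '=' ∈ part.dropWhile (fun c => c != '=') := by
      have : '=' ∈ part.takeWhile (fun c => c != '=') ++ part.dropWhile (fun c => c != '=') := by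
        rw [hsplit]; exact hmem
      rcases List.mem_append.mp this with h | h
      · exact absurd h hknoeq
      · exact h
    rcases hr : part.dropWhile (fun c => c != '=') with _|⟨y, ys⟩
    · rw [hr] at hmem'; simp at hmem'
    · have hy : y = '=' := pv_dropWhile_head_eq part y ys hr
      subst hy
      apply (PySem.Chars.startswith_iff _ _).mpr
      refine ⟨(ys.map PySem.Chars.lowerChar), ?_⟩
      have hparts : part = part.takeWhile (fun c => c != '=') ++ '=' :: ys := by
        rw [← hr, hsplit]
      rw [hparts]
      simp [List.map_append, List.map_cons, hk, show PySem.Chars.lowerChar '=' = '=' from rfl]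

-- when B's test fires, B's stored value is A's raw value
theorem pv_val_eq (part : List Char)
    (hk : PySem.Chars.lower (part.takeWhile (fun c => c != '=')) = "charset".toList) :
    part.drop ((part.takeWhile (fun c => c != '=')).length + 1) = PySem.Chars.slice part (some 8) none := by
  have hlen : (part.takeWhile (fun c => c != '=')).length = 7 := by
    have := congrArg List.length hk
    simpa [pv_lower_eq_map] using this
  rw [hlen]
  simp [pysem]

-- the dict built by B's loop answers 'charset' with the first matching segment's raw value
theorem pv_fold_get (l : List (List Char)) (d : PySem.Dict (List Char) (List Char)) :
    ((l.foldl pvStepB d).get? ("charset".toList)) = ((d.get? ("charset".toList)).or (pvFindRaw l)) := by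
  induction l generalizing d with
  | nil => simp [pvFindRaw]
  | cons p t ih =>
    rw [List.foldl_cons, ih, pvFindRaw_cons]
    unfold pvStepB
    by_cases hm : '=' ∈ PySem.Chars.strip p
    · by_cases hk : PySem.Chars.lower ((PySem.Chars.strip p).takeWhile (fun c => c != '=')) = "charset".toList
      · have hmatch : PySem.Chars.startswith (PySem.Chars.lower (PySem.Chars.strip p)) ("charset=".toList) = true :=
          (pv_match_iff _).mpr ⟨hm, hk⟩
        simp only [hm, if_true, hmatch, hk]
        rw [PySem.Dict.get?_setdefault_self]
        rw [pv_val_eq _ hk]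
        cases d.get? ("charset".toList) <;> simp
      · have hmatch : PySem.Chars.startswith (PySem.Chars.lower (PySem.Chars.strip p)) ("charset=".toList) = false := by
          rw [Bool.eq_false_iff]
          intro hc
          exact hk ((pv_match_iff _).mp hc).2
        simp only [hm, if_true, hmatch, Bool.false_eq_true, if_false]
        rw [PySem.Dict.get?_setdefault_of_ne _ _ (fun he => hk he.symm)]
    · have hmatch : PySem.Chars.startswith (PySem.Chars.lower (PySem.Chars.strip p)) ("charset=".toList) = false := by
        rw [Bool.eq_false_iff]
        intro hc
        exact hm ((pv_match_iff _).mp hc).1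
      simp only [hm, if_false, hmatch, Bool.false_eq_true]

-- B as findRaw-then-clean
theorem pv_alt_eq (content_type : String) :
    extract_header_charset_py_alt content_type =
      (pvFindRaw (PySem.Chars.splitOn content_type.toList (";".toList))).bind pvClean := by
  simp only [extract_header_charset_py_alt]
  rw [pv_fold_get, PySem.Dict.get?_empty, Option.none_or]
  cases pvFindRaw (PySem.Chars.splitOn content_type.toList (";".toList)) with
  | none => rfl
  | some raw => rfl

-- if no segment matches, findRaw yields none
theorem pv_findRaw_none (l : List (List Char))
    (h : ∀ p ∈ l, PySem.Chars.startswith (PySem.Chars.lower (PySem.Chars.strip p)) ("charset=".toList) = false) :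
    pvFindRaw l = none := by
  induction l with
  | nil => rfl
  | cons p t ih =>
    simp only [pvFindRaw, h p (by simp), Bool.false_eq_true, if_false]
    exact ih (fun q hq => h q (by simp [hq]))

-- unfoldings of the splitOn worker
theorem pv_go_zero (sep l cur : List Char) (acc : List (List Char)) :
    PySem.Chars.splitOn.go sep 0 l cur acc = ((cur.reverse ++ l) :: acc).reverse := by
  unfold PySem.Chars.splitOn.go; rfl

theorem pv_go_nil (sep cur : List Char) (n : Nat) (acc : List (List Char)) :
    PySem.Chars.splitOn.go sep (n+1) [] cur acc = (cur.reverse :: acc).reverse := by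
  unfold PySem.Chars.splitOn.go; rfl

theorem pv_go_cons (sep : List Char) (n : Nat) (c : Char) (rest cur : List Char) (acc : List (List Char)) :
    PySem.Chars.splitOn.go sep (n+1) (c :: rest) cur acc =
      (if sep.isPrefixOf (c :: rest) then PySem.Chars.splitOn.go sep n (List.drop sep.length (c :: rest)) [] (cur.reverse :: acc)
       else PySem.Chars.splitOn.go sep n rest (c :: cur) acc) := by
  conv_lhs => unfold PySem.Chars.splitOn.go

-- every piece produced by the splitOn worker is old or an infix of what remains
theorem pv_go_infix (sep : List Char) (fuel : Nat) (l cur : List Char) (acc : List (List Char)) (p : List Char)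
    (h : p ∈ PySem.Chars.splitOn.go sep fuel l cur acc) :
    p ∈ acc ∨ p <:+: (cur.reverse ++ l) := by
  induction fuel generalizing l cur acc with
  | zero =>
    rw [pv_go_zero] at h
    simp at h
    rcases h with h | h
    · exact .inl h
    · exact .inr (h ▸ List.infix_refl _)
  | succ n ih =>
    match l with
    | [] =>
      rw [pv_go_nil] at h
      simp at h
      rcases h with h | h
      · exact .inl h
      · exact .inr ⟨[], [], by simp [h]⟩
    | c :: rest =>
      rw [pv_go_cons] at h
      split at h
      · rcases ih _ _ _ h with hmem | hinf
        · rcases List.mem_cons.mp hmem with hc | hc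
          · exact .inr (hc ▸ (List.prefix_append _ _).isInfix)
          · exact .inl hc
        · refine .inr (List.IsInfix.trans ?_ ((List.drop_suffix sep.length (c::rest)).trans (List.suffix_append cur.reverse (c::rest))).isInfix)
          simpa using hinf
      · rcases ih _ _ _ h with hmem | hinf
        · exact .inl hmem
        · refine .inr ?_
          simpa using hinf

theorem pv_splitOn_infix (s sep p : List Char) (h : p ∈ PySem.Chars.splitOn s sep) :
    p <:+: s := by
  have := pv_go_infix sep (s.length + 1) s [] [] p h
  simpa using this

theorem pv_strip_infix (s : List Char) : PySem.Chars.strip s <:+: s := by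
  have h1 : PySem.Chars.lstrip s <:+ s := by
    simpa [PySem.Chars.lstrip] using List.dropWhile_suffix (l := s) (p := PySem.Chars.isspace)
  have h2 : PySem.Chars.rstrip (PySem.Chars.lstrip s) <+: PySem.Chars.lstrip s := by
    simpa [PySem.Chars.rstrip] using
      (List.dropWhile_suffix (l := (PySem.Chars.lstrip s).reverse) (p := PySem.Chars.isspace)).reverse
  exact (h2.isInfix).trans h1.isInfix

-- a matching segment forces 'charset=' to occur in the lowered input
theorem pv_match_infix (s p : List Char) (hp : p ∈ PySem.Chars.splitOn s (";".toList))
    (hm : PySem.Chars.startswith (PySem.Chars.lower (PySem.Chars.strip p)) ("charset=".toList) = true) :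
    ("charset=".toList) <:+: PySem.Chars.lower s := by
  have hpre : ("charset=".toList) <+: PySem.Chars.lower (PySem.Chars.strip p) :=
    (PySem.Chars.startswith_iff _ _).mp hm
  have hinf : PySem.Chars.strip p <:+: s := (pv_strip_infix p).trans (pv_splitOn_infix s _ p hp)
  have hmap : PySem.Chars.lower (PySem.Chars.strip p) <:+: PySem.Chars.lower s := by
    simpa [PySem.Chars.lower] using List.IsInfix.map PySem.Chars.lowerChar hinf
  exact (hpre.isInfix).trans hmap

-- ===== VERDICT (by name: the statement is the Claim_ definition above) =====
theorem extract_header_charset_py_spec : Claim_equal_extract_header_charset_py := by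
  intro ct _
  unfold Spec_extract_header_charset_py
  rw [pv_alt_eq]
  unfold extract_header_charset_py
  split
  · rename_i hg
    rcases Bool.or_eq_true_iff.mp hg with hlen | hnin
    · have h0 : ct.toList = [] := by
        have := PySem.Str.len_eq ct
        have hl : PySem.Str.len ct = 0 := by simpa using hlen
        exact List.length_eq_zero_iff.mp (by omega)
      rw [h0]
      decide
    · rw [pv_findRaw_none]
      · rfl
      · intro p hp
        by_contra hne
        have hm : PySem.Chars.startswith (PySem.Chars.lower (PySem.Chars.strip p)) ("charset=".toList) = true := by
          simpa using hne
        have hinf := pv_match_infix ct.toList p hp hm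
        have hnin' : PySem.Chars.isIn ("charset=".toList) (PySem.Chars.lower ct.toList) = false := by
          simpa using hnin
        rw [PySem.Chars.isIn_eq_false_iff] at hnin'
        exact hnin' hinf
  · rw [pv_loopA_eq_findRaw]
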